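-- pv_equiv track=rewrite | github.com/AnshMittal1811/MachineLearning-AI | 067_ECCV2020_Papers_and_Implementations_I/Component-Divide-and-Conquer-for-Real-World-Image-Super-Resolution-master/TorchTools/DataTools/FileTools.py | sample_info_video
-- ===== SOURCE A (Python) =====
-- def sample_info_video(video_frames, time_window, time_stride):
--     samples = [0] * len(video_frames)
--     area_sum_samples = [0] * len(video_frames)
--     for i, video in enumerate(video_frames):
--         samples[i] = (len(video) - time_window) // time_stride
--         if i != 0:
--             area_sum_samples[i] = sum(samples[:i])
--     return samples, area_sum_samples
-- ===== SOURCE B (Python) =====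
-- def sample_info_video(video_frames, time_window, time_stride):
--     # Single pass with a running prefix-sum accumulator instead of rescanning samples[:i].
--     samples = []
--     area_sum_samples = []
--     acc = 0
--     for video in video_frames:
--         area_sum_samples.append(acc)
--         s = (len(video) - time_window) // time_stride
--         samples.append(s)
--         acc += s
--     return samples, area_sum_samples
-- ===== Notes on version B (the rewrite author's own statement) =====
-- stated objective: alternative
-- what changed: Replaced the per-index sum(samples[:i]) rescans over a preallocated zero list with a single pass that appends a running prefix-sum accumulator (intended as asymptotically better; a timing run did not confirm a 1.5x speed-up at the measured sizes).
import Mathlib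
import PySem

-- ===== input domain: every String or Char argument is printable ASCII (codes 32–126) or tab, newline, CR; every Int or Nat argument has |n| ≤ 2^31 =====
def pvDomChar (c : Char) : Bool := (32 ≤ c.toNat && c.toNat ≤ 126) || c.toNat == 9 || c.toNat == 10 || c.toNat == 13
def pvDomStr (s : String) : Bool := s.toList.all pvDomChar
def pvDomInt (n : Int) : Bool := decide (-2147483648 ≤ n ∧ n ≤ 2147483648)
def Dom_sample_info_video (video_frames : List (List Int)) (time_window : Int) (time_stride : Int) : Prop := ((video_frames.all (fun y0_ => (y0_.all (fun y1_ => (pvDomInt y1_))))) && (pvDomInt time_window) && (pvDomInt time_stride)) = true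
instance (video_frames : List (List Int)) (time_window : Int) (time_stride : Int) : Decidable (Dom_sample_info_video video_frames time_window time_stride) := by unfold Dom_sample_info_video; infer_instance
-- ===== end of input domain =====

-- B replaces A's per-index sum(samples[:i]) rescans with one pass carrying a running
-- prefix-sum accumulator (objective: alternative single-pass decomposition).

-- ===== PORT A =====
-- A: preallocate two zero lists of length n, then for each (i, video) set
-- samples[i] = (len(video) - time_window) // time_stride and, if i != 0,
-- area_sum_samples[i] = sum(samples[:i]).  Indices from enumerate are nonnegative,
-- so `samples[i] = …` is `List.set i.toNat` and `samples[:i]` is `List.take i.toNat` (exact there).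
def sample_info_video (video_frames : List (List Int)) (time_window : Int) (time_stride : Int) : List Int × List Int :=
  (PySem.List.enumerate video_frames 0).foldl
    (fun (st : List Int × List Int) (p : Int × List Int) =>
      let samples := st.1.set p.1.toNat (PySem.Int.floordiv ((p.2.length : Int) - time_window) time_stride)
      let area := if p.1 ≠ 0 then st.2.set p.1.toNat ((samples.take p.1.toNat).sum) else st.2
      (samples, area))
    (List.replicate video_frames.length 0, List.replicate video_frames.length 0)

-- ===== PORT B =====
-- B: one pass; state = (samples so far, prefix sums so far, running accumulator).
def sample_info_video_alt (video_frames : List (List Int)) (time_window : Int) (time_stride : Int) : List Int × List Int :=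
  let r := video_frames.foldl
    (fun (st : List Int × List Int × Int) (video : List Int) =>
      let area := st.2.1 ++ [st.2.2]
      let s := PySem.Int.floordiv ((video.length : Int) - time_window) time_stride
      (st.1 ++ [s], area, st.2.2 + s))
    ([], [], 0)
  (r.1, r.2.1)

-- ===== PRECONDITION & SPEC =====
-- Pre_ excludes exactly time_stride = 0, where Python's `//` raises ZeroDivisionError (in both A and B).
def Pre_sample_info_video (video_frames : List (List Int)) (time_window : Int) (time_stride : Int) : Prop := time_stride ≠ 0
instance (video_frames : List (List Int)) (time_window : Int) (time_stride : Int) : Decidable (Pre_sample_info_video video_frames time_window time_stride) := by unfold Pre_sample_info_video; infer_instance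
def pvWitness_sample_info_video : List (List Int) × Int × Int := ([[1, 2, 3], [4]], 1, 2)
def Spec_sample_info_video (video_frames : List (List Int)) (time_window : Int) (time_stride : Int) (out : List Int × List Int) : Prop := out = sample_info_video_alt video_frames time_window time_stride
instance (video_frames : List (List Int)) (time_window : Int) (time_stride : Int) (out : List Int × List Int) : Decidable (Spec_sample_info_video video_frames time_window time_stride out) := by unfold Spec_sample_info_video; infer_instance

-- ===== CLAIM (what is proved, stated in full; the proofs are below) =====
def Claim_equal_sample_info_video : Prop := ∀ (video_frames : List (List Int)) (time_window : Int) (time_stride : Int), Dom_sample_info_video video_frames time_window time_stride → Pre_sample_info_video video_frames time_window time_stride → Spec_sample_info_video video_frames time_window time_stride (sample_info_video video_frames time_window time_stride)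

-- ===== LEMMAS AND PROOFS =====

-- per-element sample count
def pvF (tw ts : Int) (v : List Int) : Int := PySem.Int.floordiv ((v.length : Int) - tw) ts

-- prefix sums of the sample counts, starting from accumulator c
def pvPref (tw ts : Int) : List (List Int) → Int → List Int
  | [], _ => []
  | v :: t, c => c :: pvPref tw ts t (c + pvF tw ts v)

-- B's fold, with generalized accumulators
lemma B_loop (tw ts : Int) (t : List (List Int)) :
    ∀ (a b : List Int) (c : Int),
    t.foldl
      (fun (st : List Int × List Int × Int) (video : List Int) =>
        let area := st.2.1 ++ [st.2.2]
        let s := PySem.Int.floordiv ((video.length : Int) - tw) ts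
        (st.1 ++ [s], area, st.2.2 + s))
      (a, b, c)
    = (a ++ t.map (pvF tw ts), b ++ pvPref tw ts t c, c + (t.map (pvF tw ts)).sum) := by
  induction t with
  | nil => simp [pvPref]
  | cons v t ih =>
    intro a b c
    simp only [List.foldl_cons]
    rw [ih]
    simp only [pvPref, pvF, List.map_cons, List.sum_cons, List.append_assoc,
      List.singleton_append, Prod.mk.injEq]
    exact ⟨trivial, trivial, by ring⟩

-- A's fold, with generalized processed prefix
lemma A_loop (tw ts : Int) (t : List (List Int)) :
    ∀ (done adone : List Int), adone.length = done.length →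
    (PySem.List.enumerate t (done.length : Int)).foldl
      (fun (st : List Int × List Int) (p : Int × List Int) =>
        let samples := st.1.set p.1.toNat (PySem.Int.floordiv ((p.2.length : Int) - tw) ts)
        let area := if p.1 ≠ 0 then st.2.set p.1.toNat ((samples.take p.1.toNat).sum) else st.2
        (samples, area))
      (done ++ List.replicate t.length 0, adone ++ List.replicate t.length 0)
    = (done ++ t.map (pvF tw ts), adone ++ pvPref tw ts t done.sum) := by
  induction t with
  | nil => simp [pvPref]
  | cons v t ih =>
    intro done adone hlen
    rw [PySem.List.enumerate_cons]
    simp only [List.foldl_cons, Int.toNat_natCast]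
    have hset1 : (done ++ List.replicate (v :: t).length (0 : Int)).set done.length
        (PySem.Int.floordiv ((v.length : Int) - tw) ts)
        = (done ++ [pvF tw ts v]) ++ List.replicate t.length 0 := by
      simp only [List.length_cons, List.replicate_succ]
      rw [List.set_append_right _ _ (le_refl _)]
      simp [pvF]
    have htake : (((done ++ [pvF tw ts v]) ++ List.replicate t.length (0 : Int)).take
        done.length) = done := by
      rw [List.append_assoc, List.take_append_of_le_length (by simp)]
      simp
    rw [hset1, htake]
    have hif : (if ((done.length : Int)) ≠ 0 then
          (adone ++ List.replicate (v :: t).length (0 : Int)).set done.length done.sum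
        else adone ++ List.replicate (v :: t).length 0)
        = (adone ++ [done.sum]) ++ List.replicate t.length 0 := by
      by_cases h0 : done.length = 0
      · have hd : done = [] := List.eq_nil_of_length_eq_zero h0
        have ha : adone = [] := List.eq_nil_of_length_eq_zero (by omega)
        subst hd; subst ha
        simp [List.replicate_succ]
      · rw [if_pos (by exact_mod_cast h0)]
        simp only [List.length_cons, List.replicate_succ]
        rw [← hlen, List.set_append_right _ _ (le_refl _)]
        simp
    rw [hif]
    have hstart : ((done.length : Int) + 1) = (((done ++ [pvF tw ts v]).length : Nat) : Int) := by
      simp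
    rw [hstart, ih (done ++ [pvF tw ts v]) (adone ++ [done.sum]) (by simp [hlen])]
    simp [pvPref, pvF, List.sum_append]

theorem sample_info_video_spec : Claim_equal_sample_info_video := by
  intro vf tw ts _ _
  unfold Spec_sample_info_video sample_info_video sample_info_video_alt
  have hA := A_loop tw ts vf [] [] rfl
  simp only [List.length_nil, Nat.cast_zero, List.nil_append, List.sum_nil] at hA
  have hB := B_loop tw ts vf [] [] 0
  simp only [List.nil_append] at hB
  simp only [hA, hB]
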